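-- pv_equiv track=rewrite | github.com/HugoMarkoff/Plotwatcher_OCR | plotwatcher.py | _find_closest_reference
-- ===== SOURCE A (Python) =====
-- from typing import Dict, List, Any, Optional, Tuple
--
-- def _find_closest_reference(reference_points: List[Tuple[int, str]], target_seq: int) -> Optional[Tuple[int, str]]:
--     """Find the closest reference point for time prediction"""
--     if not reference_points:
--         return None
--
--     # Prefer reference before target sequence
--     before_refs = [(seq, time) for seq, time in reference_points if seq <= target_seq]
--     if before_refs:
--         return max(before_refs, key=lambda x: x[0])  # Closest before
--
--     # If no reference before, use closest after
--     after_refs = [(seq, time) for seq, time in reference_points if seq > target_seq]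
--     if after_refs:
--         return min(after_refs, key=lambda x: x[0])  # Closest after
--
--     return None
-- ===== SOURCE B (Python) =====
-- from typing import List, Optional, Tuple
--
-- def _find_closest_reference(reference_points: List[Tuple[int, str]], target_seq: int) -> Optional[Tuple[int, str]]:
--     """Index the points once (first time per distinct seq), then binary-search the
--     sorted distinct seqs for the rightmost seq <= target (else the leftmost seq)."""
--     first_time = {}
--     for seq, time in reference_points:
--         first_time.setdefault(seq, time)
--     keys = sorted(first_time)  # distinct seqs, strictly increasing
--     # binary search: lo = number of distinct seqs <= target_seq
--     lo, hi = 0, len(keys)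
--     while lo < hi:
--         mid = (lo + hi) // 2
--         if keys[mid] <= target_seq:
--             lo = mid + 1
--         else:
--             hi = mid
--     if lo > 0:
--         k = keys[lo - 1]      # largest seq <= target
--     elif keys:
--         k = keys[0]           # smallest seq (all are > target)
--     else:
--         return None
--     return (k, first_time[k])
-- ===== Notes on version B (the rewrite author's own statement) =====
-- stated objective: alternative
-- what changed: Instead of filtering the list and taking max/min, B builds a first-occurrence dict (seq -> time) in one pass, sorts the distinct seqs, and binary-searches them for the rightmost seq <= target (else the leftmost seq), returning (seq, dict[seq]).
import Mathlib
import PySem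

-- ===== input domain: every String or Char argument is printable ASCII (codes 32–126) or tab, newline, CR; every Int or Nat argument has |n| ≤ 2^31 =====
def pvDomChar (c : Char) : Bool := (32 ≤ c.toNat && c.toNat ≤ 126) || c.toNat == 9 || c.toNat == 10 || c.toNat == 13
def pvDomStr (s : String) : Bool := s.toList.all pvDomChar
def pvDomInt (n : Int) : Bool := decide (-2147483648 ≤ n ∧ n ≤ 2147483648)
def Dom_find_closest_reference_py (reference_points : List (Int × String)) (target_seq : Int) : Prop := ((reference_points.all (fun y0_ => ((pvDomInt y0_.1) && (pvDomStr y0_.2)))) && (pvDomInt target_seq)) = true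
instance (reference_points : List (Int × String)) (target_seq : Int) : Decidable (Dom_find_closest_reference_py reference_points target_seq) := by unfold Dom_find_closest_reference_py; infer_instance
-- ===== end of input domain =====

-- B indexes the points once (first time per distinct seq) and binary-searches the sorted
-- distinct seqs, instead of A's filter + max/min passes; objective: alternative algorithm.

-- ===== PORT A =====
-- literal port of A: filter before-refs, take max by seq; else filter after-refs, take min by seq
def find_closest_reference_py (reference_points : List (Int × String)) (target_seq : Int) : Option (Int × String) :=
  if reference_points = [] then none
  else
    let before_refs := reference_points.filter (fun p => decide (p.1 ≤ target_seq))
    if before_refs ≠ [] then PySem.List.max? before_refs (fun x => x.1)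
    else
      let after_refs := reference_points.filter (fun p => decide (target_seq < p.1))
      if after_refs ≠ [] then PySem.List.min? after_refs (fun x => x.1)
      else none

-- ===== PORT B =====
-- 'first_time.setdefault(seq, time)' loop of Source B: first time per distinct seq
def fcrIndex (reference_points : List (Int × String)) : PySem.Dict Int String :=
  reference_points.foldl (fun d p => d.setdefault p.1 p.2) PySem.Dict.empty

-- the 'while lo < hi' binary-search loop of Source B (keys[mid] indexing is always in range);
-- the fuel argument only bounds the iteration count (hi - lo shrinks every step)
def fcrBisectAux (ks : List Int) (t : Int) : Nat → Nat → Nat → Nat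
  | 0, lo, _ => lo
  | fuel + 1, lo, hi =>
    if lo < hi then
      if ks.getD ((lo + hi) / 2) 0 ≤ t then fcrBisectAux ks t fuel ((lo + hi) / 2 + 1) hi
      else fcrBisectAux ks t fuel lo ((lo + hi) / 2)
    else lo

def fcrBisect (ks : List Int) (t : Int) (lo hi : Nat) : Nat :=
  fcrBisectAux ks t (hi - lo) lo hi

-- Source B: index once, sort the distinct seqs, binary-search for the number of seqs ≤ target;
-- first_time[k] is ported as getD (k is always a key of the dict)
def find_closest_reference_py_alt (reference_points : List (Int × String)) (target_seq : Int) : Option (Int × String) :=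
  let d := fcrIndex reference_points
  let ks := PySem.List.sorted d.keys (fun x => x)
  let lo := fcrBisect ks target_seq 0 ks.length
  if 0 < lo then
    some (ks.getD (lo - 1) 0, d.getD (ks.getD (lo - 1) 0) "")
  else if ks ≠ [] then
    some (ks.getD 0 0, d.getD (ks.getD 0 0) "")
  else none

-- ===== PRECONDITION & SPEC =====
def Spec_find_closest_reference_py (reference_points : List (Int × String)) (target_seq : Int) (out : Option (Int × String)) : Prop := out = find_closest_reference_py_alt reference_points target_seq
instance (reference_points : List (Int × String)) (target_seq : Int) (out : Option (Int × String)) : Decidable (Spec_find_closest_reference_py reference_points target_seq out) := by unfold Spec_find_closest_reference_py; infer_instance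

-- ===== CLAIM (what is proved, stated in full; the proofs are below) =====
def Claim_equal_find_closest_reference_py : Prop := ∀ (reference_points : List (Int × String)) (target_seq : Int), Dom_find_closest_reference_py reference_points target_seq → Spec_find_closest_reference_py reference_points target_seq (find_closest_reference_py reference_points target_seq)

-- ===== LEMMAS AND PROOFS =====

-- the dict built by fcrIndex: its keys are the distinct seqs in first-occurrence order
theorem fcrIndex_keys_aux (reference_points : List (Int × String)) :
    ∀ d : PySem.Dict Int String,
      (reference_points.foldl (fun d p => d.setdefault p.1 p.2) d).keys
        = PySem.Set.update d.keys (reference_points.map (fun p => p.1)) := by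
  induction reference_points with
  | nil => intro d; simp [PySem.Set.update_nil]
  | cons p rps ih =>
    intro d
    rw [List.foldl_cons, List.map_cons, PySem.Set.update_cons, ih]
    congr 1
    by_cases hc : d.contains p.1 = true
    · rw [PySem.Dict.setdefault_of_contains _ _ hc,
        PySem.Set.add_of_mem ((PySem.Dict.contains_iff_mem_keys d p.1).mp hc)]
    · have hc' : d.contains p.1 = false := by simpa using hc
      rw [PySem.Dict.setdefault_of_not_contains _ _ hc',
        PySem.Dict.keys_insert_of_not_contains _ _ hc',
        PySem.Set.add_of_not_mem]
      intro hm
      exact hc ((PySem.Dict.contains_iff_mem_keys d p.1).mpr hm)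

theorem fcrIndex_keys (reference_points : List (Int × String)) :
    (fcrIndex reference_points).keys = PySem.Set.ofList (reference_points.map (fun p => p.1)) := by
  unfold fcrIndex
  rw [fcrIndex_keys_aux]
  simp [PySem.Dict.keys_empty, PySem.Set.update_nil_left]

-- a lookup in the fcrIndex dict is the FIRST pair of the list with that seq
theorem fcrIndex_get_aux (reference_points : List (Int × String)) :
    ∀ (d : PySem.Dict Int String) (k : Int),
      (reference_points.foldl (fun d p => d.setdefault p.1 p.2) d).get? k
        = if d.contains k = true then d.get? k
          else (reference_points.find? (fun p => p.1 == k)).map (fun p => p.2) := by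
  induction reference_points with
  | nil =>
    intro d k
    by_cases hc : d.contains k = true
    · simp [hc]
    · have hc' : d.contains k = false := by simpa using hc
      have hnone : d.get? k = none := by
        rw [PySem.Dict.get?_eq_none_iff_not_mem_keys]
        intro hm
        exact hc ((PySem.Dict.contains_iff_mem_keys d k).mpr hm)
      simp [hc', hnone]
  | cons p rps ih =>
    intro d k
    rw [List.foldl_cons, ih]
    by_cases hpk : p.1 = k
    · have hc' : (d.setdefault p.1 p.2).contains k = true := by
        rw [PySem.Dict.contains_setdefault]; simp [hpk]
      rw [if_pos hc', List.find?_cons_of_pos (by simp [hpk])]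
      by_cases hc : d.contains k = true
      · rw [PySem.Dict.setdefault_of_contains _ _ (by rwa [hpk]), if_pos hc]
      · have hc0 : d.contains k = false := by simpa using hc
        rw [PySem.Dict.setdefault_of_not_contains _ _ (by rwa [hpk]), if_neg hc]
        rw [hpk, PySem.Dict.get?_insert_self]
        have : d.get? k = none := by
          rw [PySem.Dict.get?_eq_none_iff_not_mem_keys]
          intro hm
          exact hc ((PySem.Dict.contains_iff_mem_keys d k).mpr hm)
        simp
    · have hne : (k == p.1) = false := by
        simp only [beq_eq_false_iff_ne, ne_eq]
        exact fun h => hpk h.symm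
      have hc' : (d.setdefault p.1 p.2).contains k = d.contains k := by
        rw [PySem.Dict.contains_setdefault, hne, Bool.false_or]
      rw [hc', PySem.Dict.get?_setdefault_of_ne _ _ (fun h => hpk h.symm),
        List.find?_cons_of_neg (by simp [hpk])]

theorem fcrIndex_get? (reference_points : List (Int × String)) (k : Int) :
    (fcrIndex reference_points).get? k
      = (reference_points.find? (fun p => p.1 == k)).map (fun p => p.2) := by
  unfold fcrIndex
  rw [fcrIndex_get_aux]
  simp [PySem.Dict.contains_empty]

-- correctness of the binary-search loop on a nondecreasing list
theorem fcrBisectAux_spec (ks : List Int) (t : Int)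
    (hmono : ∀ (p q : Nat) (hp : p < ks.length) (hq : q < ks.length), p ≤ q → ks[p] ≤ ks[q]) :
    ∀ (fuel lo hi : Nat), hi - lo ≤ fuel → lo ≤ hi → hi ≤ ks.length →
    (∀ (j : Nat) (hj : j < ks.length), j < lo → ks[j] ≤ t) →
    (∀ (j : Nat) (hj : j < ks.length), hi ≤ j → t < ks[j]) →
    fcrBisectAux ks t fuel lo hi ≤ ks.length ∧
      (∀ (j : Nat) (hj : j < ks.length), j < fcrBisectAux ks t fuel lo hi → ks[j] ≤ t) ∧
      (∀ (j : Nat) (hj : j < ks.length), fcrBisectAux ks t fuel lo hi ≤ j → t < ks[j]) := by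
  intro fuel
  induction fuel with
  | zero =>
    intro lo hi hfuel h1 h2 hlo hhi
    have hle : lo = hi := by omega
    simp only [fcrBisectAux]
    exact ⟨by omega, fun j hj hjlt => hlo j hj hjlt, fun j hj hjge => hhi j hj (hle ▸ hjge)⟩
  | succ fuel ih =>
    intro lo hi hfuel h1 h2 hlo hhi
    simp only [fcrBisectAux]
    by_cases h : lo < hi
    · rw [if_pos h]
      have hmid : (lo + hi) / 2 < ks.length := by omega
      rw [List.getD_eq_getElem ks 0 hmid]
      by_cases hcmp : ks[(lo + hi) / 2] ≤ t
      · rw [if_pos hcmp]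
        exact ih ((lo + hi) / 2 + 1) hi (by omega) (by omega) h2
          (fun j hj hjlt => le_trans (hmono j ((lo + hi) / 2) hj hmid (by omega)) hcmp)
          hhi
      · rw [if_neg hcmp]
        exact ih lo ((lo + hi) / 2) (by omega) (by omega) (by omega)
          hlo
          (fun j hj hjge => lt_of_lt_of_le (lt_of_not_ge hcmp) (hmono ((lo + hi) / 2) j hmid hj hjge))
    · rw [if_neg h]
      have hle : lo = hi := by omega
      exact ⟨by omega, fun j hj hjlt => hlo j hj hjlt, fun j hj hjge => hhi j hj (by omega)⟩

theorem fcrBisect_spec (ks : List Int) (t : Int)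
    (hmono : ∀ (p q : Nat) (hp : p < ks.length) (hq : q < ks.length), p ≤ q → ks[p] ≤ ks[q])
    (lo hi : Nat) (h1 : lo ≤ hi) (h2 : hi ≤ ks.length)
    (hlo : ∀ (j : Nat) (hj : j < ks.length), j < lo → ks[j] ≤ t)
    (hhi : ∀ (j : Nat) (hj : j < ks.length), hi ≤ j → t < ks[j]) :
    fcrBisect ks t lo hi ≤ ks.length ∧
      (∀ (j : Nat) (hj : j < ks.length), j < fcrBisect ks t lo hi → ks[j] ≤ t) ∧
      (∀ (j : Nat) (hj : j < ks.length), fcrBisect ks t lo hi ≤ j → t < ks[j]) :=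
  fcrBisectAux_spec ks t hmono (hi - lo) lo hi (le_refl _) h1 h2 hlo hhi

-- the fold inside PySem.List.max?/min? with key (·.1), named
def fcrMaxF (acc : Option (Int × String)) (x : Int × String) : Option (Int × String) :=
  match acc with
  | none => some x
  | some m => if m.1 < x.1 then some x else some m

def fcrMinF (acc : Option (Int × String)) (x : Int × String) : Option (Int × String) :=
  match acc with
  | none => some x
  | some m => if x.1 < m.1 then some x else some m

theorem max?_eq_foldl (xs : List (Int × String)) :
    PySem.List.max? xs (fun x => x.1) = xs.foldl fcrMaxF none := by
  unfold PySem.List.max?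
  congr 1
  funext acc x
  cases acc <;> simp [fcrMaxF]

theorem min?_eq_foldl (xs : List (Int × String)) :
    PySem.List.min? xs (fun x => x.1) = xs.foldl fcrMinF none := by
  unfold PySem.List.min?
  congr 1
  funext acc x
  cases acc <;> simp [fcrMinF]

theorem fcrMaxF_stay (l : List (Int × String)) :
    ∀ a : Int × String, (∀ y ∈ l, y.1 ≤ a.1) → l.foldl fcrMaxF (some a) = some a := by
  induction l with
  | nil => intro a _; rfl
  | cons y l ih =>
    intro a h
    have hy : ¬ a.1 < y.1 := not_lt.mpr (h y (List.mem_cons_self))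
    rw [List.foldl_cons]
    simp only [fcrMaxF, if_neg hy]
    exact ih a (fun z hz => h z (List.mem_cons_of_mem _ hz))

theorem fcrMinF_stay (l : List (Int × String)) :
    ∀ a : Int × String, (∀ y ∈ l, a.1 ≤ y.1) → l.foldl fcrMinF (some a) = some a := by
  induction l with
  | nil => intro a _; rfl
  | cons y l ih =>
    intro a h
    have hy : ¬ y.1 < a.1 := not_lt.mpr (h y (List.mem_cons_self))
    rw [List.foldl_cons]
    simp only [fcrMinF, if_neg hy]
    exact ih a (fun z hz => h z (List.mem_cons_of_mem _ hz))

theorem fcrMaxF_find (k : Int) (l : List (Int × String)) :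
    ∀ a : Int × String, a.1 < k → (∀ y ∈ l, y.1 ≤ k) → (∃ y ∈ l, y.1 = k) →
      l.foldl fcrMaxF (some a) = l.find? (fun y => y.1 == k) := by
  induction l with
  | nil => rintro a _ _ ⟨y, hy, _⟩; exact absurd hy (List.not_mem_nil)
  | cons y l ih =>
    intro a ha hub hex
    by_cases hy : y.1 = k
    · rw [List.foldl_cons]
      simp only [fcrMaxF, if_pos (hy ▸ ha)]
      rw [List.find?_cons_of_pos (by simp [hy])]
      exact fcrMaxF_stay l y (fun z hz => hy ▸ hub z (List.mem_cons_of_mem _ hz))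
    · rw [List.foldl_cons, List.find?_cons_of_neg (by simp [hy])]
      have hylt : y.1 < k := lt_of_le_of_ne (hub y (List.mem_cons_self)) hy
      have hex' : ∃ z ∈ l, z.1 = k := by
        obtain ⟨z, hz, hzk⟩ := hex
        rcases List.mem_cons.mp hz with h | h
        · exact absurd (h ▸ hzk) hy
        · exact ⟨z, h, hzk⟩
      have hub' : ∀ z ∈ l, z.1 ≤ k := fun z hz => hub z (List.mem_cons_of_mem _ hz)
      simp only [fcrMaxF]
      by_cases hcmp : a.1 < y.1
      · rw [if_pos hcmp]; exact ih y hylt hub' hex'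
      · rw [if_neg hcmp]; exact ih a ha hub' hex'

theorem fcrMinF_find (k : Int) (l : List (Int × String)) :
    ∀ a : Int × String, k < a.1 → (∀ y ∈ l, k ≤ y.1) → (∃ y ∈ l, y.1 = k) →
      l.foldl fcrMinF (some a) = l.find? (fun y => y.1 == k) := by
  induction l with
  | nil => rintro a _ _ ⟨y, hy, _⟩; exact absurd hy (List.not_mem_nil)
  | cons y l ih =>
    intro a ha hlb hex
    by_cases hy : y.1 = k
    · rw [List.foldl_cons]
      simp only [fcrMinF, if_pos (hy ▸ ha)]
      rw [List.find?_cons_of_pos (by simp [hy])]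
      exact fcrMinF_stay l y (fun z hz => hy ▸ hlb z (List.mem_cons_of_mem _ hz))
    · rw [List.foldl_cons, List.find?_cons_of_neg (by simp [hy])]
      have hygt : k < y.1 := lt_of_le_of_ne (hlb y (List.mem_cons_self)) (fun h => hy h.symm)
      have hex' : ∃ z ∈ l, z.1 = k := by
        obtain ⟨z, hz, hzk⟩ := hex
        rcases List.mem_cons.mp hz with h | h
        · exact absurd (h ▸ hzk) hy
        · exact ⟨z, h, hzk⟩
      have hlb' : ∀ z ∈ l, k ≤ z.1 := fun z hz => hlb z (List.mem_cons_of_mem _ hz)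
      simp only [fcrMinF]
      by_cases hcmp : y.1 < a.1
      · rw [if_pos hcmp]; exact ih y hygt hlb' hex'
      · rw [if_neg hcmp]; exact ih a ha hlb' hex'

-- A's max/min with first-tie semantics, as 'first element whose key is k'
theorem max?_eq_find (xs : List (Int × String)) (k : Int)
    (hub : ∀ y ∈ xs, y.1 ≤ k) (hex : ∃ y ∈ xs, y.1 = k) :
    PySem.List.max? xs (fun x => x.1) = xs.find? (fun y => y.1 == k) := by
  rw [max?_eq_foldl]
  cases xs with
  | nil => obtain ⟨y, hy, _⟩ := hex; exact absurd hy (List.not_mem_nil)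
  | cons x l =>
    rw [List.foldl_cons]
    show l.foldl fcrMaxF (some x) = _
    by_cases hx : x.1 = k
    · rw [List.find?_cons_of_pos (by simp [hx])]
      exact fcrMaxF_stay l x (fun z hz => hx ▸ hub z (List.mem_cons_of_mem _ hz))
    · rw [List.find?_cons_of_neg (by simp [hx])]
      have hex' : ∃ z ∈ l, z.1 = k := by
        obtain ⟨z, hz, hzk⟩ := hex
        rcases List.mem_cons.mp hz with h | h
        · exact absurd (h ▸ hzk) hx
        · exact ⟨z, h, hzk⟩
      exact fcrMaxF_find k l x (lt_of_le_of_ne (hub x (List.mem_cons_self)) hx)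
        (fun z hz => hub z (List.mem_cons_of_mem _ hz)) hex'

theorem min?_eq_find (xs : List (Int × String)) (k : Int)
    (hlb : ∀ y ∈ xs, k ≤ y.1) (hex : ∃ y ∈ xs, y.1 = k) :
    PySem.List.min? xs (fun x => x.1) = xs.find? (fun y => y.1 == k) := by
  rw [min?_eq_foldl]
  cases xs with
  | nil => obtain ⟨y, hy, _⟩ := hex; exact absurd hy (List.not_mem_nil)
  | cons x l =>
    rw [List.foldl_cons]
    show l.foldl fcrMinF (some x) = _
    by_cases hx : x.1 = k
    · rw [List.find?_cons_of_pos (by simp [hx])]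
      exact fcrMinF_stay l x (fun z hz => hx ▸ hlb z (List.mem_cons_of_mem _ hz))
    · rw [List.find?_cons_of_neg (by simp [hx])]
      have hex' : ∃ z ∈ l, z.1 = k := by
        obtain ⟨z, hz, hzk⟩ := hex
        rcases List.mem_cons.mp hz with h | h
        · exact absurd (h ▸ hzk) hx
        · exact ⟨z, h, hzk⟩
      exact fcrMinF_find k l x (lt_of_le_of_ne (hlb x (List.mem_cons_self)) (fun h => hx h.symm))
        (fun z hz => hlb z (List.mem_cons_of_mem _ hz)) hex'

-- the first k-keyed element of the before-filter is the first k-keyed element of the list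
theorem find_filter_eq (t k : Int) : ∀ (rps : List (Int × String)), k ≤ t →
    (∀ p ∈ rps, p.1 ≤ t → p.1 ≤ k) →
    (rps.filter (fun p => decide (p.1 ≤ t))).find? (fun y => y.1 == k)
      = rps.find? (fun y => y.1 == k) := by
  intro rps
  induction rps with
  | nil => intro _ _; rfl
  | cons p rps ih =>
    intro hk hmax
    by_cases hpt : p.1 ≤ t
    · rw [List.filter_cons_of_pos (by simpa using hpt)]
      by_cases hpk : p.1 = k
      · rw [List.find?_cons_of_pos (by simp [hpk]), List.find?_cons_of_pos (by simp [hpk])]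
      · rw [List.find?_cons_of_neg (by simp [hpk]), List.find?_cons_of_neg (by simp [hpk])]
        exact ih hk (fun q hq => hmax q (List.mem_cons_of_mem _ hq))
    · rw [List.filter_cons_of_neg (by simpa using hpt)]
      rw [List.find?_cons_of_neg (by simp; intro h; exact hpt (h ▸ hk))]
      exact ih hk (fun q hq => hmax q (List.mem_cons_of_mem _ hq))

-- ===== VERDICT (by name: the statement is the Claim_ definition above) =====
theorem find_closest_reference_py_spec : Claim_equal_find_closest_reference_py := by
  intro rps t _
  unfold Spec_find_closest_reference_py
  simp only [find_closest_reference_py, find_closest_reference_py_alt]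
  set d := fcrIndex rps with hd
  set ks := PySem.List.sorted d.keys (fun x => x) with hks
  have hkeys : d.keys = PySem.Set.ofList (rps.map (fun p => p.1)) := fcrIndex_keys rps
  have hks_lt : ks.Pairwise (· < ·) := by
    rw [hks, hkeys]; exact PySem.List.sorted_ofList_pairwise_lt _
  have hmem : ∀ x : Int, x ∈ ks ↔ ∃ p ∈ rps, p.1 = x := by
    intro x
    rw [hks, PySem.List.mem_sorted, hkeys, PySem.Set.mem_ofList, List.mem_map]
  have hmono : ∀ (p q : Nat) (hp : p < ks.length) (hq : q < ks.length), p ≤ q → ks[p] ≤ ks[q] := by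
    intro p q hp hq hpq
    rcases Nat.lt_or_eq_of_le hpq with h | h
    · exact le_of_lt (List.pairwise_iff_getElem.mp hks_lt p q hp hq h)
    · subst h; exact le_refl _
  obtain ⟨hL1, hL2, hL3⟩ := fcrBisect_spec ks t hmono 0 ks.length (Nat.zero_le _) (le_refl _)
    (fun j hj hjlt => absurd hjlt (by omega)) (fun j hj hjge => absurd hj (by omega))
  set L := fcrBisect ks t 0 ks.length with hL
  by_cases hnil : rps = []
  · have hksnil : ks = [] := by
      rw [hks, PySem.List.sorted_eq_nil_iff, hkeys, hnil]; rfl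
    have hL0 : L = 0 := by rw [hksnil] at hL1; simpa using hL1
    rw [if_pos hnil, hL0, hksnil]
    simp
  · rw [if_neg hnil]
    set before := rps.filter (fun p => decide (p.1 ≤ t)) with hb
    by_cases hbe : before = []
    · -- no reference at or before the target: A takes min over the after-filter (= the whole list)
      have hall : ∀ p ∈ rps, t < p.1 := by
        intro p hp
        have := List.filter_eq_nil_iff.mp hbe p hp
        simpa using this
      have hafter : rps.filter (fun p => decide (t < p.1)) = rps :=
        List.filter_eq_self.mpr (fun p hp => by simpa using hall p hp)
      rw [if_neg (by simpa using hbe), hafter, if_pos hnil]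
      have hksne : ks ≠ [] := by
        obtain ⟨p, hp⟩ := List.exists_mem_of_ne_nil rps hnil
        exact List.ne_nil_of_mem ((hmem p.1).mpr ⟨p, hp, rfl⟩)
      have hkslen : 0 < ks.length := by
        cases hksl : ks with
        | nil => exact absurd hksl hksne
        | cons a l => simp
      have hL0 : L = 0 := by
        by_contra h
        have h0 : 0 < L := Nat.pos_of_ne_zero h
        have h1 : ks[0] ≤ t := hL2 0 hkslen h0
        obtain ⟨p, hp, hpk⟩ := (hmem ks[0]).mp (List.getElem_mem hkslen)
        exact absurd (hpk ▸ h1) (not_le.mpr (hall p hp))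
      rw [if_neg (by omega), if_pos hksne]
      have hlb : ∀ p ∈ rps, ks[0] ≤ p.1 := by
        intro p hp
        obtain ⟨j, hj, hjeq⟩ := List.mem_iff_getElem.mp ((hmem p.1).mpr ⟨p, hp, rfl⟩)
        rw [← hjeq]
        exact hmono 0 j hkslen hj (Nat.zero_le _)
      have hmemk : ∃ p ∈ rps, p.1 = ks[0] := (hmem _).mp (List.getElem_mem hkslen)
      rw [min?_eq_find rps ks[0] hlb hmemk]
      obtain ⟨q, hq⟩ : ∃ q, rps.find? (fun y => y.1 == ks[0]) = some q := by
        obtain ⟨p, hp, hpk⟩ := hmemk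
        exact Option.isSome_iff_exists.mp
          (List.find?_isSome.mpr ⟨p, hp, by simp [hpk]⟩)
      have hq1 : q.1 = ks[0] := by simpa using List.find?_some hq
      rw [hq, List.getD_eq_getElem ks 0 hkslen,
        PySem.Dict.getD_eq_get?_getD, fcrIndex_get?, hq]
      obtain ⟨q1, q2⟩ := q
      simp only [Option.getD_some, Option.map_some]
      rw [← hq1]
    · -- a reference at or before the target exists: A takes max over the before-filter
      obtain ⟨p0, hp0⟩ := List.exists_mem_of_ne_nil before hbe
      have hp0m := List.mem_filter.mp hp0
      have hp0t : p0.1 ≤ t := by simpa using hp0m.2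
      have hL0 : 0 < L := by
        obtain ⟨j, hj, hjeq⟩ := List.mem_iff_getElem.mp ((hmem p0.1).mpr ⟨p0, hp0m.1, rfl⟩)
        by_contra h
        have h1 : t < ks[j] := hL3 j hj (by omega)
        rw [hjeq] at h1
        exact absurd hp0t (not_le.mpr h1)
      have hL1' : L - 1 < ks.length := by omega
      have hkle : ks[L-1] ≤ t := hL2 (L-1) hL1' (by omega)
      have hub : ∀ p ∈ rps, p.1 ≤ t → p.1 ≤ ks[L-1] := by
        intro p hp hpt
        obtain ⟨j, hj, hjeq⟩ := List.mem_iff_getElem.mp ((hmem p.1).mpr ⟨p, hp, rfl⟩)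
        have hjL : j < L := by
          by_contra h
          have := hL3 j hj (by omega)
          rw [hjeq] at this
          exact absurd hpt (not_le.mpr this)
        rw [← hjeq]
        exact hmono j (L-1) hj hL1' (by omega)
      have hubb : ∀ y ∈ before, y.1 ≤ ks[L-1] := by
        intro y hy
        have hym := List.mem_filter.mp hy
        exact hub y hym.1 (by simpa using hym.2)
      have hmemk : ∃ p ∈ rps, p.1 = ks[L-1] := (hmem _).mp (List.getElem_mem hL1')
      have hmemb : ∃ y ∈ before, y.1 = ks[L-1] := by
        obtain ⟨p, hp, hpk⟩ := hmemk
        exact ⟨p, List.mem_filter.mpr ⟨hp, by simp [hpk, hkle]⟩, hpk⟩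
      rw [if_pos (by simpa using hbe), max?_eq_find before ks[L-1] hubb hmemb, hb,
        find_filter_eq t ks[L-1] rps hkle hub]
      obtain ⟨q, hq⟩ : ∃ q, rps.find? (fun y => y.1 == ks[L-1]) = some q := by
        obtain ⟨p, hp, hpk⟩ := hmemk
        exact Option.isSome_iff_exists.mp
          (List.find?_isSome.mpr ⟨p, hp, by simp [hpk]⟩)
      have hq1 : q.1 = ks[L-1] := by simpa using List.find?_some hq
      rw [hq, if_pos hL0, List.getD_eq_getElem ks (0:Int) hL1',
        PySem.Dict.getD_eq_get?_getD, fcrIndex_get?, hq]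
      obtain ⟨q1, q2⟩ := q
      simp only [Option.getD_some, Option.map_some]
      rw [← hq1]
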